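-- pv_equiv track=rewrite | github.com/ZihengZZH/LeetCode | py/4SumII.py | fourSumCountSlow
-- ===== SOURCE A (Python) =====
-- def fourSumCountSlow(A, B, C, D):
--
--     lst_1, lst_2 = [], []
--     count = 0
--     for a in A:
--         for b in B:
--             lst_1.append(a+b)
--     for c in C:
--         for d in D:
--             lst_2.append(c+d)
--     for item1 in lst_1:
--         for item2 in lst_2:
--             if item1 + item2 == 0:
--                 count += 1
--     return count
-- ===== SOURCE B (Python) =====
-- def fourSumCountSlow(A, B, C, D):
--     sums = {}
--     for a in A:
--         for b in B:
--             s = a + b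
--             sums[s] = sums.get(s, 0) + 1
--     count = 0
--     for c in C:
--         for d in D:
--             count += sums.get(-(c + d), 0)
--     return count
-- ===== Notes on version B (the rewrite author's own statement) =====
-- stated objective: faster
-- what changed: Instead of materialising both pairwise-sum lists and comparing every A+B sum with every C+D sum, B builds a hash map counting A+B sums once and, for each C+D sum, adds the count of its negation.
import Mathlib
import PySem

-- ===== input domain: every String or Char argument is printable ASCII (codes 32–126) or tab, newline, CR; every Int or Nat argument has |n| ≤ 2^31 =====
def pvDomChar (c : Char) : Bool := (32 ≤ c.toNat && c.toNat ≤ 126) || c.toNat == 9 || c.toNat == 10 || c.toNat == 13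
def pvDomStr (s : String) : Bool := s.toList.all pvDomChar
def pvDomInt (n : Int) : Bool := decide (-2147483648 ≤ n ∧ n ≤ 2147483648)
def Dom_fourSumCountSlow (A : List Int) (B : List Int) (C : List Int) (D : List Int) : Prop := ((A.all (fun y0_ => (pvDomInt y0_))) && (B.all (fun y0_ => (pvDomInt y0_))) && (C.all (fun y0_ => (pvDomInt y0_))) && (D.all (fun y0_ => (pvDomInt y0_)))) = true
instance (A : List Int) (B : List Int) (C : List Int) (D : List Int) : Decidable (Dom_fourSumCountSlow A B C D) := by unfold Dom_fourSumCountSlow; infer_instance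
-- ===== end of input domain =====

-- B replaces the O(n^4) all-pairs comparison by a hash map of A+B sum counts looked up for each negated C+D sum.


-- ===== PORT A =====
def fourSumCountSlow (A : List Int) (B : List Int) (C : List Int) (D : List Int) : Int :=
  let lst1 := A.foldl (fun acc a => B.foldl (fun acc b => acc ++ [a + b]) acc) []
  let lst2 := C.foldl (fun acc c => D.foldl (fun acc d => acc ++ [c + d]) acc) []
  lst1.foldl (fun cnt item1 =>
    lst2.foldl (fun cnt item2 => if item1 + item2 == 0 then cnt + 1 else cnt) cnt) 0

-- ===== PORT B =====
def fourSumCountSlow_alt (A : List Int) (B : List Int) (C : List Int) (D : List Int) : Int :=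
  let sums := A.foldl (fun d a =>
    B.foldl (fun d b => d.insert (a + b) (d.getD (a + b) 0 + 1)) d) PySem.Dict.empty
  C.foldl (fun cnt c =>
    D.foldl (fun cnt d => cnt + sums.getD (-(c + d)) 0) cnt) 0

-- ===== PRECONDITION & SPEC =====
def Spec_fourSumCountSlow (A : List Int) (B : List Int) (C : List Int) (D : List Int) (out : Int) : Prop := out = fourSumCountSlow_alt A B C D
instance (A : List Int) (B : List Int) (C : List Int) (D : List Int) (out : Int) : Decidable (Spec_fourSumCountSlow A B C D out) := by unfold Spec_fourSumCountSlow; infer_instance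

-- ===== CLAIM (what is proved, stated in full; the proofs are below) =====
def Claim_equal_fourSumCountSlow : Prop := ∀ (A : List Int) (B : List Int) (C : List Int) (D : List Int), Dom_fourSumCountSlow A B C D → Spec_fourSumCountSlow A B C D (fourSumCountSlow A B C D)

-- ===== LEMMAS AND PROOFS =====

-- a nested loop over A and B consuming a+b is a loop over the flattened pair-sum list
theorem foldl_pairs {σ : Type} (A B : List Int) (g : σ → Int → σ) (init : σ) :
    A.foldl (fun s a => B.foldl (fun s b => g s (a + b)) s) init
      = (A.flatMap (fun a => B.map (fun b => a + b))).foldl g init := by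
  induction A generalizing init with
  | nil => simp
  | cons a A ih => simp [List.foldl_append, List.foldl_map, ih]

theorem foldl_concat (l : List Int) (init : List Int) :
    l.foldl (fun acc x => acc ++ [x]) init = init ++ l := by
  induction l generalizing init with
  | nil => simp
  | cons x l ih => simp [ih]

-- inner counting loop of A: adds the number of matching elements
theorem foldl_count_inner (x : Int) (l2 : List Int) (c : Int) :
    l2.foldl (fun c y => if x + y == 0 then c + 1 else c) c
      = c + (l2.countP (fun y => x + y == 0) : Int) := by
  induction l2 generalizing c with
  | nil => simp
  | cons y l2 ih =>
    rw [List.foldl_cons, List.countP_cons, ih]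
    by_cases h : (x + y == 0) = true
    · simp only [h, if_true]; push_cast; ring
    · simp only [h]; push_cast; ring

theorem foldl_count_outer (l1 l2 : List Int) (c : Int) :
    l1.foldl (fun c x => l2.foldl (fun c y => if x + y == 0 then c + 1 else c) c) c
      = c + (l1.map (fun x => (l2.countP (fun y => x + y == 0) : Int))).sum := by
  induction l1 generalizing c with
  | nil => simp
  | cons x l1 ih =>
    rw [List.foldl_cons, foldl_count_inner, ih, List.map_cons, List.sum_cons]
    ring

-- inner lookup loop of B: adds one count per element
theorem foldl_getD_sum (l2 : List Int) (f : Int → Int) (c : Int) :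
    l2.foldl (fun c y => c + f y) c = c + (l2.map f).sum := by
  induction l2 generalizing c with
  | nil => simp
  | cons y l2 ih => simp [ih]; ring

theorem sum_indicator (x : Int) (l2 : List Int) :
    (l2.map (fun y => if x + y == 0 then (1 : Int) else 0)).sum
      = (l2.countP (fun y => x + y == 0) : Int) := by
  induction l2 with
  | nil => simp
  | cons y l2 ih =>
    rw [List.map_cons, List.sum_cons, List.countP_cons, ih]
    by_cases h : (x + y == 0) = true
    · simp only [h, if_true]; push_cast; ring
    · simp only [h]; push_cast; ring

-- exchange of summation: counting matches from the l1 side equals counting from the l2 side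
theorem sum_swap (l1 l2 : List Int) :
    (l1.map (fun x => (l2.countP (fun y => x + y == 0) : Int))).sum
      = (l2.map (fun y => (l1.countP (fun x => x + y == 0) : Int))).sum := by
  induction l1 with
  | nil => simp
  | cons x l1 ih =>
    simp only [List.map_cons, List.sum_cons, List.countP_cons, ih, ← sum_indicator x l2]
    rw [← List.sum_map_add]
    congr 1
    refine List.map_congr_left ?_
    intro y _
    by_cases h : (x + y == 0) = true
    · simp only [h, if_true]; push_cast; ring
    · simp only [h]; push_cast; ring

theorem countP_eq_count (l : List Int) (y : Int) :
    l.countP (fun x => x + y == 0) = l.count (-y) := by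
  unfold List.count
  apply List.countP_congr
  intro x _
  rw [Bool.eq_iff_iff]
  simp only [beq_iff_eq, iff_true]
  constructor <;> intro h <;> omega

theorem lst_pairs (A B : List Int) :
    A.foldl (fun acc a => B.foldl (fun acc b => acc ++ [a + b]) acc) []
      = A.flatMap (fun a => B.map (fun b => a + b)) :=
  (foldl_pairs A B (fun acc s => acc ++ [s]) []).trans
    ((foldl_concat _ []).trans (List.nil_append _))

theorem dict_pairs (A B : List Int) :
    A.foldl (fun d a => B.foldl (fun d b => d.insert (a + b) (d.getD (a + b) 0 + 1)) d)
        PySem.Dict.empty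
      = PySem.Dict.counter (A.flatMap (fun a => B.map (fun b => a + b))) :=
  (foldl_pairs (σ := PySem.Dict Int Int) A B (fun d s => d.insert s (d.getD s 0 + 1)) PySem.Dict.empty).trans
    (PySem.Dict.foldl_insert_getD_add_one_eq_counter _)

theorem alt_count (C D : List Int) (dct : PySem.Dict Int Int) :
    C.foldl (fun cnt c => D.foldl (fun cnt d => cnt + dct.getD (-(c + d)) 0) cnt) 0
      = ((C.flatMap (fun c => D.map (fun d => c + d))).map (fun s => dct.getD (-s) 0)).sum :=
  ((foldl_pairs C D (fun cnt s => cnt + dct.getD (-s) 0) 0).trans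
    (foldl_getD_sum _ _ 0)).trans (zero_add _)

theorem fourSumCountSlow_spec : Claim_equal_fourSumCountSlow := by
  unfold Claim_equal_fourSumCountSlow
  intro A B C D _
  unfold Spec_fourSumCountSlow fourSumCountSlow fourSumCountSlow_alt
  dsimp only
  rw [lst_pairs A B, lst_pairs C D, dict_pairs A B, alt_count C D, foldl_count_outer,
      zero_add, sum_swap]
  refine congrArg List.sum (List.map_congr_left ?_)
  intro y _
  rw [PySem.Dict.getD_counter, countP_eq_count]
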